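-- pv_equiv track=rewrite | github.com/acmeism/RosettaCodeData | Task/Periodic-table/Python/periodic-table.py | perta
-- ===== SOURCE A (Python) =====
-- def perta(atomic) -> (int, int):
--
--     NOBLES = 2, 10, 18, 36, 54, 86, 118
--     INTERTWINED = 0, 0, 0, 0, 0, 57, 89
--     INTERTWINING_SIZE = 14
--     LINE_WIDTH = 18
--
--     prev_noble = 0
--     for row, noble in enumerate(NOBLES):
--         if atomic <= noble:  # we are at the good row. We now need to determine the column
--             nb_elem = noble - prev_noble  # number of elements on that row
--             rank =  atomic - prev_noble  # rank of the input element among elements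
--             if INTERTWINED[row] and INTERTWINED[row] <= atomic <= INTERTWINED[row] + INTERTWINING_SIZE:  # lantanides or actinides
--                 row += 2
--                 col = rank + 1
--             else:  # not a lantanide nor actinide
--                 # handle empty spaces between 1-2, 4-5 and 12-13.
--                 nb_empty = LINE_WIDTH - nb_elem  # spaces count as columns
--                 inside_left_element_rank = 2 if noble > 2 else 1
--                 col = rank + (nb_empty if rank > inside_left_element_rank else 0)
--             break
--         prev_noble = noble
--     return row+1, col
-- ===== SOURCE B (Python) =====
-- def perta(atomic) -> (int, int):
--     NOBLES = (2, 10, 18, 36, 54, 86, 118)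
--     # binary search: smallest row with atomic <= NOBLES[row]
--     lo, hi = 0, 7
--     while lo < hi:
--         mid = (lo + hi) // 2
--         if NOBLES[mid] < atomic:
--             lo = mid + 1
--         else:
--             hi = mid
--     row = lo
--     prev = NOBLES[row - 1] if row > 0 else 0
--     rank = atomic - prev
--     if row >= 5 and prev + 3 <= atomic <= prev + 17:  # lanthanides / actinides
--         return row + 3, rank + 1
--     left = 2 if row > 0 else 1
--     nb_empty = 18 - (NOBLES[row] - prev)
--     return row + 1, rank + (nb_empty if rank > left else 0)
-- ===== Notes on version B (the rewrite author's own statement) =====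
-- stated objective: alternative
-- what changed: Replaces the linear enumerate-scan with prev_noble tracking by a hand-written binary search over the sorted NOBLES table, then computes prev/rank/column by direct index lookup.
-- outside the precondition, e.g. on perta(119): A raises UnboundLocalError, B raises IndexError
import Mathlib
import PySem

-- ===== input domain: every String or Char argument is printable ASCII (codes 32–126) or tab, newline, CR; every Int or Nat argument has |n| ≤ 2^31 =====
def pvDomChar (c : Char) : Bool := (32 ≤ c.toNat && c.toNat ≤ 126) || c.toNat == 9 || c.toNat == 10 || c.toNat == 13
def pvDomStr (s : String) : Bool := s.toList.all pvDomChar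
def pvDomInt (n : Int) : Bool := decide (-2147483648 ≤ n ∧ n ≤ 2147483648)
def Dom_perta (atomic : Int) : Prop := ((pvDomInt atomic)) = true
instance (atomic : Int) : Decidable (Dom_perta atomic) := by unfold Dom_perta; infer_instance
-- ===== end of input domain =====

-- B replaces A's linear scan over the noble-gas thresholds by a binary search into the
-- same sorted table; return value equivalence on atomic ≤ 118 (both raise above 118).

-- ===== PORT A =====
-- loop over enumerate(zip(NOBLES, INTERTWINED)) carrying row and prev_noble;
-- the [] case is unreachable for atomic ≤ 118 (Python raises UnboundLocalError there)
def pertaLoop (atomic : Int) (row : Int) (prev : Int) : List (Int × Int) → Int × Int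
  | [] => (0, 0)
  | (noble, intw) :: rest =>
    if atomic ≤ noble then
      let nbElem := noble - prev
      let rank := atomic - prev
      if intw ≠ 0 ∧ intw ≤ atomic ∧ atomic ≤ intw + 14 then
        ((row + 2) + 1, rank + 1)
      else
        let nbEmpty := 18 - nbElem
        let insideLeft : Int := if noble > 2 then 2 else 1
        (row + 1, rank + (if rank > insideLeft then nbEmpty else 0))
    else pertaLoop atomic (row + 1) noble rest

def perta (atomic : Int) : Int × Int :=
  pertaLoop atomic 0 0 [(2, 0), (10, 0), (18, 0), (36, 0), (54, 0), (86, 57), (118, 89)]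

-- ===== PORT B =====
-- hand-written binary search from Source B: smallest index with atomic ≤ nobles[idx]
-- the while loop runs at most ⌈log2 7⌉+1 = 3 times; fuel = hi - lo bounds it structurally
def pertaBsearch (nobles : List Int) (atomic : Int) : Nat → Nat → Nat → Nat
  | 0, lo, _ => lo
  | fuel + 1, lo, hi =>
    if lo < hi then
      let mid := (lo + hi) / 2
      if nobles.getD mid 0 < atomic then pertaBsearch nobles atomic fuel (mid + 1) hi
      else pertaBsearch nobles atomic fuel lo mid
    else lo

def perta_alt (atomic : Int) : Int × Int :=
  let nobles : List Int := [2, 10, 18, 36, 54, 86, 118]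
  let row := pertaBsearch nobles atomic 7 0 7
  let prev : Int := if row > 0 then nobles.getD (row - 1) 0 else 0
  let rank := atomic - prev
  if row ≥ 5 ∧ prev + 3 ≤ atomic ∧ atomic ≤ prev + 17 then
    ((row : Int) + 3, rank + 1)
  else
    let left : Int := if row > 0 then 2 else 1
    let nbEmpty : Int := 18 - (nobles.getD row 0 - prev)
    ((row : Int) + 1, rank + (if rank > left then nbEmpty else 0))

-- ===== PRECONDITION & SPEC =====
-- Pre_ excludes atomic > 118, where A raises UnboundLocalError (B raises IndexError).
def Pre_perta (atomic : Int) : Prop := atomic ≤ 118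
instance (atomic : Int) : Decidable (Pre_perta atomic) := by unfold Pre_perta; infer_instance
def pvWitness_perta : Int := 26

def Spec_perta (atomic : Int) (out : Int × Int) : Prop := out = perta_alt atomic
instance (atomic : Int) (out : Int × Int) : Decidable (Spec_perta atomic out) := by unfold Spec_perta; infer_instance

-- ===== CLAIM (what is proved, stated in full; the proofs are below) =====
def Claim_equal_perta : Prop := ∀ (atomic : Int), Dom_perta atomic → Pre_perta atomic → Spec_perta atomic (perta atomic)

-- ===== LEMMAS AND PROOFS =====

-- ===== VERDICT (by name: the statement is the Claim_ definition above) =====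
theorem perta_spec : Claim_equal_perta := by
  intro atomic _ hpre
  unfold Spec_perta Pre_perta at *
  by_cases h2 : atomic ≤ 2
  · simp [perta, pertaLoop, perta_alt, pertaBsearch,
      show atomic ≤ 2 from by omega,
      show ¬ (36:Int) < atomic from by omega,
      show ¬ (10:Int) < atomic from by omega,
      show ¬ (2:Int) < atomic from by omega]
  by_cases h10 : atomic ≤ 10
  · simp [perta, pertaLoop, perta_alt, pertaBsearch,
      show ¬ atomic ≤ 2 from by omega,
      show atomic ≤ 10 from by omega,
      show ¬ (36:Int) < atomic from by omega,
      show ¬ (10:Int) < atomic from by omega,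
      show (2:Int) < atomic from by omega]
  by_cases h18 : atomic ≤ 18
  · simp [perta, pertaLoop, perta_alt, pertaBsearch,
      show ¬ atomic ≤ 2 from by omega,
      show ¬ atomic ≤ 10 from by omega,
      show atomic ≤ 18 from by omega,
      show ¬ (36:Int) < atomic from by omega,
      show (10:Int) < atomic from by omega,
      show ¬ (18:Int) < atomic from by omega]
  by_cases h36 : atomic ≤ 36
  · simp [perta, pertaLoop, perta_alt, pertaBsearch,
      show ¬ atomic ≤ 2 from by omega,
      show ¬ atomic ≤ 10 from by omega,
      show ¬ atomic ≤ 18 from by omega,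
      show atomic ≤ 36 from by omega,
      show ¬ (36:Int) < atomic from by omega,
      show (10:Int) < atomic from by omega,
      show (18:Int) < atomic from by omega]
  by_cases h54 : atomic ≤ 54
  · simp [perta, pertaLoop, perta_alt, pertaBsearch,
      show ¬ atomic ≤ 2 from by omega,
      show ¬ atomic ≤ 10 from by omega,
      show ¬ atomic ≤ 18 from by omega,
      show ¬ atomic ≤ 36 from by omega,
      show atomic ≤ 54 from by omega,
      show (36:Int) < atomic from by omega,
      show ¬ (86:Int) < atomic from by omega,
      show ¬ (54:Int) < atomic from by omega]
  by_cases h86 : atomic ≤ 86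
  · simp [perta, pertaLoop, perta_alt, pertaBsearch,
      show ¬ atomic ≤ 2 from by omega,
      show ¬ atomic ≤ 10 from by omega,
      show ¬ atomic ≤ 18 from by omega,
      show ¬ atomic ≤ 36 from by omega,
      show ¬ atomic ≤ 54 from by omega,
      show atomic ≤ 86 from by omega,
      show (36:Int) < atomic from by omega,
      show ¬ (86:Int) < atomic from by omega,
      show (54:Int) < atomic from by omega]
  · simp [perta, pertaLoop, perta_alt, pertaBsearch,
      show ¬ atomic ≤ 2 from by omega,
      show ¬ atomic ≤ 10 from by omega,
      show ¬ atomic ≤ 18 from by omega,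
      show ¬ atomic ≤ 36 from by omega,
      show ¬ atomic ≤ 54 from by omega,
      show ¬ atomic ≤ 86 from by omega,
      show atomic ≤ 118 from by omega,
      show (36:Int) < atomic from by omega,
      show (86:Int) < atomic from by omega,
      show ¬ (118:Int) < atomic from by omega]
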